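-- pv_equiv track=rewrite | github.com/jojo3141/Maturaarbeit-J-Heger | Umsetzung der Lösungsmethoden in Python/Rubiks_Cube.py | reverse_alg
-- ===== SOURCE A (Python) =====
-- normal_moves = ["R", "U", "F", "L", "B", "D"]
--
-- inverted_moves = ["Ri", "Ui", "Fi", "Li", "Bi", "Di"]
--
-- def reverse_alg(alg):
--     alg = list(reversed(alg))
--     for i in range(6):
--         for j in range(len(alg)):
--             if alg[j] == normal_moves[i]:
--                 alg[j] = inverted_moves[i]
--             elif alg[j] == inverted_moves[i]:
--                 alg[j] = normal_moves[i]
--     return alg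
-- ===== SOURCE B (Python) =====
-- normal_moves = ["R", "U", "F", "L", "B", "D"]
--
-- inverted_moves = ["Ri", "Ui", "Fi", "Li", "Bi", "Di"]
--
-- def reverse_alg(alg):
--     out = []
--     i = len(alg) - 1
--     while i >= 0:
--         m = alg[i]
--         if m in normal_moves:
--             m = m + "i"
--         elif m.endswith("i") and m[:-1] in normal_moves:
--             m = m[:-1]
--         out.append(m)
--         i -= 1
--     return out
-- ===== Notes on version B (the rewrite author's own statement) =====
-- stated objective: simpler
-- what changed: Replaces A's reversed copy plus six in-place rewrite scans (and the inverted_moves table) by one backward index walk that inverts each move by string suffix surgery - append 'i' to a base move, strip a trailing 'i' whose stem is a base move - and appends it to the output.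
import Mathlib
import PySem

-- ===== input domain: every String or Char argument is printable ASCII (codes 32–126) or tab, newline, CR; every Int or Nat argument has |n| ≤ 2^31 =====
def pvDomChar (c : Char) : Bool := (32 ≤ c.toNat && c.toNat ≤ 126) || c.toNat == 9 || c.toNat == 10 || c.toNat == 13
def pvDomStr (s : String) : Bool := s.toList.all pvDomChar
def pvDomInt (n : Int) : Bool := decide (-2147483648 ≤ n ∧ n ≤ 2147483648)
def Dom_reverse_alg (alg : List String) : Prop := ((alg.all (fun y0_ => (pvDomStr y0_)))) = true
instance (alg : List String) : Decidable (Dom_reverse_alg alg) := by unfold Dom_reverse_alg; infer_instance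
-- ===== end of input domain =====

-- B is simpler: one backward index walk that inverts each move by toggling its "i" suffix
-- (string surgery, no inverted_moves table) and appends it to the output, instead of
-- A's reversed copy followed by six in-place rewrite scans.
-- A rebinds its parameter, so the caller's list is not mutated; this file is about the return value.

-- ===== PORT A =====
def normalMoves : List String := ["R", "U", "F", "L", "B", "D"]
def invertedMoves : List String := ["Ri", "Ui", "Fi", "Li", "Bi", "Di"]

-- the inner 'for j in range(len(alg))' loop: visits each position j in order and
-- rewrites alg[j] according to A's two branches (in the same order), length unchanged
def innerScan (nm im : String) : List String → List String
  | [] => []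
  | v :: rest =>
      (if v = nm then im else if v = im then nm else v) :: innerScan nm im rest

def reverse_alg (alg : List String) : List String :=
  (PySem.List.pyRange 0 6 1).foldl
    (fun a i => innerScan (PySem.List.pyGetD normalMoves i "") (PySem.List.pyGetD invertedMoves i "") a)
    alg.reverse

-- ===== PORT B =====
-- the 'while i >= 0' loop, recursing on k = i + 1: read alg[i], toggle the "i" suffix when
-- m (or m minus its trailing "i") is a base move, append to out, step i down
def bGo (alg : List String) : Nat → List String → List String
  | 0, out => out
  | (k+1), out =>
      bGo alg k
        (out ++ [ (fun m =>
            if normalMoves.contains m then m ++ "i"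
            else if PySem.Str.endswith m "i" && normalMoves.contains (PySem.Str.slice m none (some (-1))) then
              PySem.Str.slice m none (some (-1))
            else m) (PySem.List.pyGetD alg (k : Int) "") ])

-- out = []; i = len(alg) - 1; while i >= 0: …; return out
def reverse_alg_alt (alg : List String) : List String :=
  bGo alg alg.length []

-- ===== PRECONDITION & SPEC =====
def Spec_reverse_alg (alg : List String) (out : List String) : Prop := out = reverse_alg_alt alg
instance (alg : List String) (out : List String) : Decidable (Spec_reverse_alg alg out) := by unfold Spec_reverse_alg; infer_instance

-- ===== CLAIM (what is proved, stated in full; the proofs are below) =====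
def Claim_equal_reverse_alg : Prop := ∀ (alg : List String), Dom_reverse_alg alg → Spec_reverse_alg alg (reverse_alg alg)

-- ===== LEMMAS AND PROOFS =====

-- B's per-element transform
def invMove (m : String) : String :=
  if normalMoves.contains m then m ++ "i"
  else if PySem.Str.endswith m "i" && normalMoves.contains (PySem.Str.slice m none (some (-1))) then
    PySem.Str.slice m none (some (-1))
  else m

lemma innerScan_eq_map (nm im : String) (l : List String) :
    innerScan nm im l = l.map (fun v => if v = nm then im else if v = im then nm else v) := by
  induction l with
  | nil => rfl
  | cons v rest ih => simp [innerScan, ih]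

lemma bGo_eq (alg : List String) (k : Nat) (hk : k ≤ alg.length) (out : List String) :
    bGo alg k out = out ++ ((alg.take k).map invMove).reverse := by
  induction k generalizing out with
  | zero => simp [bGo]
  | succ k ih =>
      have hlt : k < alg.length := hk
      have hget : PySem.List.pyGetD alg (k : Int) "" = alg[k] := by
        rw [PySem.List.pyGetD_natCast]
        exact List.getD_eq_getElem alg "" hlt
      have h1 : List.take (k+1) alg = List.take k alg ++ [alg[k]] := by
        rw [List.take_add_one, List.getElem?_eq_getElem hlt]
        rfl
      have h2 : List.take (k+1) (List.map invMove alg)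
          = List.take k (List.map invMove alg) ++ [invMove alg[k]] := by
        rw [List.take_add_one, List.getElem?_map, List.getElem?_eq_getElem hlt]
        rfl
      rw [bGo, ih (Nat.le_of_succ_le hk), h1, hget]
      simp [h2, invMove]

-- if m ends in "i" and m[:-1] = b, then m = b ++ "i"
lemma ends_slice_char (m b : String) (he : PySem.Str.endswith m "i" = true)
    (hs : PySem.Str.slice m none (some (-1)) = b) : m = b ++ "i" := by
  have he' : ("i".toList) <:+ m.toList := by
    have := PySem.Str.endswith_eq m "i"
    rw [this] at he
    exact (PySem.Chars.endswith_iff _ _).mp he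
  obtain ⟨l, hl⟩ := he'
  have hdrop : (PySem.Str.slice m none (some (-1))).toList = m.toList.dropLast :=
    PySem.Str.slice_to_neg_one m
  rw [hs] at hdrop
  have hlL : m.toList.dropLast = l := by
    rw [← hl]; simp
  apply String.toList_inj.mp
  rw [← hl, ← hlL]
  simp [hdrop]

set_option maxHeartbeats 1600000 in
lemma flip_eq_invMove (m : String) :
    ((fun v => if v = "D" then "Di" else if v = "Di" then "D" else v) ∘
     (fun v => if v = "B" then "Bi" else if v = "Bi" then "B" else v) ∘
     (fun v => if v = "L" then "Li" else if v = "Li" then "L" else v) ∘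
     (fun v => if v = "F" then "Fi" else if v = "Fi" then "F" else v) ∘
     (fun v => if v = "U" then "Ui" else if v = "Ui" then "U" else v) ∘
     (fun v => if v = "R" then "Ri" else if v = "Ri" then "R" else v)) m
    = invMove m := by
  by_cases h1 : m = "R"
  · subst h1; decide
  by_cases h2 : m = "U"
  · subst h2; decide
  by_cases h3 : m = "F"
  · subst h3; decide
  by_cases h4 : m = "L"
  · subst h4; decide
  by_cases h5 : m = "B"
  · subst h5; decide
  by_cases h6 : m = "D"
  · subst h6; decide
  by_cases h7 : m = "Ri"
  · subst h7; decide
  by_cases h8 : m = "Ui"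
  · subst h8; decide
  by_cases h9 : m = "Fi"
  · subst h9; decide
  by_cases h10 : m = "Li"
  · subst h10; decide
  by_cases h11 : m = "Bi"
  · subst h11; decide
  by_cases h12 : m = "Di"
  · subst h12; decide
  -- m is none of the 12 tokens: both sides leave it unchanged
  have hnm : m ∉ normalMoves := by simp [normalMoves, h1, h2, h3, h4, h5, h6]
  have hcond : ¬ (PySem.Chars.endswith m.toList ['i'] = true ∧ PySem.Str.slice m none (some (-1)) ∈ normalMoves) := by
    rintro ⟨he', hs⟩
    have he : PySem.Str.endswith m "i" = true := by
      rw [PySem.Str.endswith_eq]; simpa using he'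
    simp only [normalMoves, List.mem_cons, List.not_mem_nil, or_false] at hs
    rcases hs with hs | hs | hs | hs | hs | hs
    · exact h7 (ends_slice_char m _ he hs)
    · exact h8 (ends_slice_char m _ he hs)
    · exact h9 (ends_slice_char m _ he hs)
    · exact h10 (ends_slice_char m _ he hs)
    · exact h11 (ends_slice_char m _ he hs)
    · exact h12 (ends_slice_char m _ he hs)
  simp [Function.comp, invMove, h1, h2, h3, h4, h5, h6, h7, h8, h9, h10, h11, h12, hnm, hcond]

-- ===== VERDICT (by name: the statement is the Claim_ definition above) =====
theorem reverse_alg_spec : Claim_equal_reverse_alg := by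
  intro alg _
  show reverse_alg alg = reverse_alg_alt alg
  unfold reverse_alg reverse_alg_alt
  have hr : PySem.List.pyRange 0 6 1 = [0, 1, 2, 3, 4, 5] := by decide
  rw [hr]
  simp only [List.foldl, innerScan_eq_map, List.map_map]
  rw [bGo_eq alg alg.length le_rfl []]
  rw [List.take_length, List.nil_append, ← List.map_reverse]
  have e0 : PySem.List.pyGetD normalMoves 0 "" = "R" := by decide
  have e1 : PySem.List.pyGetD normalMoves 1 "" = "U" := by decide
  have e2 : PySem.List.pyGetD normalMoves 2 "" = "F" := by decide
  have e3 : PySem.List.pyGetD normalMoves 3 "" = "L" := by decide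
  have e4 : PySem.List.pyGetD normalMoves 4 "" = "B" := by decide
  have e5 : PySem.List.pyGetD normalMoves 5 "" = "D" := by decide
  have f0 : PySem.List.pyGetD invertedMoves 0 "" = "Ri" := by decide
  have f1 : PySem.List.pyGetD invertedMoves 1 "" = "Ui" := by decide
  have f2 : PySem.List.pyGetD invertedMoves 2 "" = "Fi" := by decide
  have f3 : PySem.List.pyGetD invertedMoves 3 "" = "Li" := by decide
  have f4 : PySem.List.pyGetD invertedMoves 4 "" = "Bi" := by decide
  have f5 : PySem.List.pyGetD invertedMoves 5 "" = "Di" := by decide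
  rw [e0, e1, e2, e3, e4, e5, f0, f1, f2, f3, f4, f5]
  exact List.map_congr_left fun m _ => flip_eq_invMove m
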